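-- pv_equiv track=rewrite | github.com/Nmbirla/Smart_Store_Organization- | SmartStoreOrganizer_Final.py | BuildLabelledItems
-- ===== SOURCE A (Python) =====
-- def BuildLabelledItems(basketData):
--
--     itemLabelLookup = {}
--     labelItemLookup = {}
--     itemID = 0
--     for basketID in basketData:
--         for item in basketData[basketID]:
--             if item not in itemLabelLookup.keys():
--                 itemID += 1
--                 itemLabelLookup[item] = itemID
--                 labelItemLookup[itemID] = item
--     return itemLabelLookup, labelItemLookup
-- ===== SOURCE B (Python) =====
-- def BuildLabelledItems(basketData):
--     # flatten, record each item's first position once, then recover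
--     # first-appearance order by sorting the distinct items by that position
--     flat = [item for basketID in basketData for item in basketData[basketID]]
--     firstIndex = {}
--     for i, item in enumerate(flat):
--         firstIndex.setdefault(item, i)
--     ordered = sorted(firstIndex, key=firstIndex.get)
--     itemLabelLookup = {}
--     labelItemLookup = {}
--     for i, item in enumerate(ordered, 1):
--         itemLabelLookup[item] = i
--         labelItemLookup[i] = item
--     return itemLabelLookup, labelItemLookup
-- ===== Notes on version B (the rewrite author's own statement) =====
-- stated objective: alternative
-- what changed: Instead of A's single guarded pass that grows both dicts with a manual counter, B flattens all baskets, records each item's first position once via dict.setdefault, recovers first-appearance order by sorting the distinct items by that first position, and then fills both lookup tables from an enumeration starting at 1.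
import Mathlib
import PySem

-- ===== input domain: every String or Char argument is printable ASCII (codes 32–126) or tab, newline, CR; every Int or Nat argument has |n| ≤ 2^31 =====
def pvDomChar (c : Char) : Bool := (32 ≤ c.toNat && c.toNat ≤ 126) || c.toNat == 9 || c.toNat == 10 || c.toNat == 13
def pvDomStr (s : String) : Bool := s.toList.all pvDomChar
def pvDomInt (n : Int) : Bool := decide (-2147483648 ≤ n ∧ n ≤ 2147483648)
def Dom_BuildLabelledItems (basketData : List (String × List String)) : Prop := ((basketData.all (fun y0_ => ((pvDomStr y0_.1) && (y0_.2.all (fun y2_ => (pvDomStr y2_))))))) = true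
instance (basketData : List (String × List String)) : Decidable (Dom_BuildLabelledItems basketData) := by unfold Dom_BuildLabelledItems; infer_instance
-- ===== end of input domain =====

-- B rebuilds the first-appearance order by sorting the distinct items by their first index
-- in the flattened item stream (sorted(set(flat), key=flat.index)), instead of A's single
-- guarded pass with a manual counter; proved to return A's exact value (objective: alternative).


-- ===== PORT A =====
-- A's inner loop body: the 'if item not in itemLabelLookup.keys(): …' step
def pvAStep (st : PySem.Dict String Int × PySem.Dict Int String × Int) (item : String) :
    PySem.Dict String Int × PySem.Dict Int String × Int :=
  if item ∈ st.1.keys then st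
  else
    let itemID := st.2.2 + 1
    (st.1.insert item itemID, st.2.1.insert itemID item, itemID)

def BuildLabelledItems (basketData : List (String × List String)) :
    (List (String × Int)) × (List (Int × String)) :=
  let st := basketData.foldl (fun st basket => basket.2.foldl pvAStep st) (⟨[]⟩, ⟨[]⟩, 0)
  (st.1.items, st.2.1.items)

-- ===== PORT B =====
-- key=firstIndex.get: every sorted element is a key of firstIndex so get is always found;
-- the getD 0 default is unreachable
def pvBKey (d : PySem.Dict String Int) (x : String) : Int := (d.get? x).getD 0

def pvFI (flat : List String) : PySem.Dict String Int :=
  (PySem.List.enumerate flat 0).foldl (fun d p => d.setdefault p.2 p.1) ⟨[]⟩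

def BuildLabelledItems_alt (basketData : List (String × List String)) :
    (List (String × Int)) × (List (Int × String)) :=
  let flat := basketData.flatMap (fun b => b.2)
  let firstIndex := pvFI flat
  let ordered := PySem.List.sorted firstIndex.keys (pvBKey firstIndex) false
  let st := (PySem.List.enumerate ordered 1).foldl
      (fun st p => (st.1.insert p.2 p.1, st.2.insert p.1 p.2))
      ((⟨[]⟩ : PySem.Dict String Int), (⟨[]⟩ : PySem.Dict Int String))
  (st.1.items, st.2.items)

-- ===== PRECONDITION & SPEC =====
def Spec_BuildLabelledItems (basketData : List (String × List String)) (out : (List (String × Int)) × (List (Int × String))) : Prop := out = BuildLabelledItems_alt basketData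
instance (basketData : List (String × List String)) (out : (List (String × Int)) × (List (Int × String))) : Decidable (Spec_BuildLabelledItems basketData out) := by unfold Spec_BuildLabelledItems; infer_instance

-- ===== CLAIM (what is proved, stated in full; the proofs are below) =====
def Claim_equal_BuildLabelledItems : Prop := ∀ (basketData : List (String × List String)), Dom_BuildLabelledItems basketData → Spec_BuildLabelledItems basketData (BuildLabelledItems basketData)

-- ===== LEMMAS AND PROOFS =====

-- the state of A's loop after the distinct items seen so far are exactly l (in order)
def pvMk (l : List String) : PySem.Dict String Int × PySem.Dict Int String × Int :=
  (⟨(PySem.List.enumerate l 1).map (fun p => (p.2, p.1))⟩, ⟨PySem.List.enumerate l 1⟩, (l.length : Int))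

lemma pvMk_keys (l : List String) : (pvMk l).1.keys = l := by
  show List.map (fun x => x.1) (List.map (fun p => (p.2, p.1)) (PySem.List.enumerate l 1)) = l
  rw [List.map_map]
  exact PySem.List.map_snd_enumerate l 1

lemma pvAStep_mk (l : List String) (x : String) :
    pvAStep (pvMk l) x = pvMk (l ++ [x]) ∨ (x ∈ l ∧ pvAStep (pvMk l) x = pvMk l) := by
  by_cases hx : x ∈ l
  · right
    exact ⟨hx, by simp [pvAStep, pvMk_keys, hx]⟩
  · left
    have hc1 : ((pvMk l).1.contains x) = false := by
      rw [← Bool.not_eq_true]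
      intro h
      exact hx (by simpa [pvMk_keys] using (PySem.Dict.contains_iff_mem_keys (pvMk l).1 x).mp h)
    have hc2 : ((pvMk l).2.1.contains ((l.length : Int) + 1)) = false := by
      rw [← Bool.not_eq_true]
      intro h
      have := (PySem.Dict.contains_iff_mem_keys (pvMk l).2.1 _).mp h
      simp only [pvMk, PySem.Dict.keys, PySem.List.map_fst_enumerate] at this
      have := PySem.List.mem_pyRange_one.mp this
      omega
    simp only [pvAStep, pvMk_keys, hx, if_false]
    simp only [pvMk] at hc1 hc2 ⊢
    simp only [PySem.Dict.insert, hc1, hc2, Bool.false_eq_true, if_false,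
      Prod.mk.injEq, PySem.Dict.mk.injEq]
    refine ⟨?_, ?_, by simp⟩ <;>
      simp [PySem.List.enumerate_append, PySem.List.enumerate_cons,
        PySem.List.enumerate_nil] <;> omega

lemma pvAStep_eq_add (l : List String) (x : String) :
    pvAStep (pvMk l) x = pvMk (PySem.Set.add l x) := by
  rcases pvAStep_mk l x with h | ⟨hx, h⟩
  · rw [h]
    congr 1
    by_cases hmem : x ∈ l
    · simp [pvAStep, pvMk_keys, hmem] at h
      exfalso
      have := congrArg (fun st => st.2.2) h
      simp [pvMk] at this
    · simp [PySem.Set.add, hmem]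
  · rw [h]
    congr 1
    simp [PySem.Set.add, hx]

lemma pvFold_mk (xs : List String) (l : List String) :
    xs.foldl pvAStep (pvMk l) = pvMk (xs.foldl PySem.Set.add l) := by
  induction xs generalizing l with
  | nil => rfl
  | cons x xs ih => simp only [List.foldl_cons, pvAStep_eq_add, ih]

-- the first-index dict: lookups are the first index in flat, keys are the distinct items in order
lemma pvFI_step (xs : List String) (y : String) :
    pvFI (xs ++ [y]) = (pvFI xs).setdefault y (xs.length : Int) := by
  unfold pvFI
  rw [PySem.List.enumerate_append, List.foldl_append]
  simp [PySem.List.enumerate_cons, PySem.List.enumerate_nil]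

lemma pvFI_get? (xs : List String) :
    ∀ (x : String), (pvFI xs).get? x = (PySem.List.index? xs x).map (fun k => (k : Int)) := by
  induction xs using List.reverseRecOn with
  | nil =>
    intro x
    rw [(PySem.List.index?_eq_none_iff [] x).mpr (List.not_mem_nil)]
    rfl
  | append_singleton xs y ih =>
    intro x
    have hcont : (pvFI xs).contains y = (decide (y ∈ xs)) := by
      rw [PySem.Dict.contains_eq_isSome_get?, ih y]
      by_cases hy : y ∈ xs
      · obtain ⟨k, hk⟩ := Option.isSome_iff_exists.mp ((PySem.List.index?_isSome_iff xs y).mpr hy)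
        rw [hk]
        simp [hy]
      · rw [(PySem.List.index?_eq_none_iff xs y).mpr hy]
        simp [hy]
    rw [pvFI_step]
    by_cases hy : y ∈ xs
    · rw [PySem.Dict.setdefault_of_contains _ _ (by rw [hcont]; simpa using hy)]
      by_cases hx : x ∈ xs
      · rw [PySem.List.index?_append_of_mem [y] hx]
        exact ih x
      · have hx' : x ∉ xs ++ [y] := by
          simp only [List.mem_append, List.mem_singleton]
          rintro (h | rfl)
          · exact hx h
          · exact hx hy
        rw [(PySem.List.index?_eq_none_iff _ x).mpr hx', ih x,
          (PySem.List.index?_eq_none_iff xs x).mpr hx]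
    · rw [PySem.Dict.setdefault_of_not_contains _ _ (by rw [hcont]; simpa using hy)]
      by_cases hxy : x = y
      · subst hxy
        rw [PySem.Dict.get?_insert_self, PySem.List.index?_append_singleton_self xs x hy]
        rfl
      · rw [PySem.Dict.get?_insert_of_ne _ _ hxy, ih x]
        by_cases hx : x ∈ xs
        · rw [PySem.List.index?_append_of_mem [y] hx]
        · have hx' : x ∉ xs ++ [y] := by
            simp only [List.mem_append, List.mem_singleton]
            rintro (h | rfl)
            · exact hx h
            · exact hxy rfl
          rw [(PySem.List.index?_eq_none_iff _ x).mpr hx',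
            (PySem.List.index?_eq_none_iff xs x).mpr hx]

lemma pvFI_contains (xs : List String) (x : String) :
    (pvFI xs).contains x = (decide (x ∈ xs)) := by
  rw [PySem.Dict.contains_eq_isSome_get?, pvFI_get? xs x]
  by_cases hx : x ∈ xs
  · obtain ⟨k, hk⟩ := Option.isSome_iff_exists.mp ((PySem.List.index?_isSome_iff xs x).mpr hx)
    rw [hk]
    simp [hx]
  · rw [(PySem.List.index?_eq_none_iff xs x).mpr hx]
    simp [hx]

lemma pvFI_keys (xs : List String) : (pvFI xs).keys = PySem.Set.ofList xs := by
  induction xs using List.reverseRecOn with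
  | nil => rfl
  | append_singleton xs y ih =>
    rw [pvFI_step, PySem.Set.ofList_append_singleton]
    by_cases hy : y ∈ xs
    · rw [PySem.Dict.setdefault_of_contains _ _ (by rw [pvFI_contains]; simpa using hy), ih,
        PySem.Set.add_of_mem (by rw [PySem.Set.mem_ofList]; exact hy)]
    · rw [PySem.Dict.setdefault_of_not_contains _ _ (by rw [pvFI_contains]; simpa using hy),
        PySem.Dict.keys_insert_of_not_contains _ _ (by rw [pvFI_contains]; simpa using hy), ih,
        PySem.Set.add_of_not_mem (by rw [PySem.Set.mem_ofList]; exact hy)]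

-- the distinct items in first-appearance order are already sorted by first index
def pvIdx (flat : List String) (x : String) : Nat := (PySem.List.index? flat x).getD 0

lemma pvKey_lt_length (xs : List String) (a : String) (ha : a ∈ xs) :
    pvIdx xs a < xs.length := by
  obtain ⟨k, hk⟩ := Option.isSome_iff_exists.mp ((PySem.List.index?_isSome_iff xs a).mpr ha)
  obtain ⟨hlt, -, -⟩ := PySem.List.getElem_of_index?_eq_some hk
  unfold pvIdx
  rw [hk, Option.getD_some]
  exact hlt

lemma pvOfList_pairwise (xs : List String) :
    (PySem.Set.ofList xs).Pairwise (fun a b => pvIdx xs a ≤ pvIdx xs b) := by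
  induction xs using List.reverseRecOn with
  | nil => simp [PySem.Set.ofList_nil]
  | append_singleton xs x ih =>
    have hkey : ∀ a ∈ xs, pvIdx (xs ++ [x]) a = pvIdx xs a := by
      intro a ha
      unfold pvIdx
      rw [PySem.List.index?_append_of_mem [x] ha]
    by_cases hx : x ∈ xs
    · rw [PySem.Set.ofList_append_singleton,
        PySem.Set.add_of_mem (by simpa [PySem.Set.mem_ofList] using hx)]
      exact ih.imp_of_mem (fun ha hb h => by
        rw [hkey _ ((PySem.Set.mem_ofList _ _).mp ha), hkey _ ((PySem.Set.mem_ofList _ _).mp hb)]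
        exact h)
    · rw [PySem.Set.ofList_append_singleton,
        PySem.Set.add_of_not_mem (by simpa [PySem.Set.mem_ofList] using hx)]
      rw [List.pairwise_append]
      refine ⟨ih.imp_of_mem (fun ha hb h => by
          rw [hkey _ ((PySem.Set.mem_ofList _ _).mp ha), hkey _ ((PySem.Set.mem_ofList _ _).mp hb)]
          exact h), List.pairwise_singleton _ _, ?_⟩
      intro a ha b hb
      rw [List.mem_singleton] at hb
      have haxs : a ∈ xs := (PySem.Set.mem_ofList _ _).mp ha
      have hbx : pvIdx (xs ++ [x]) x = xs.length := by
        unfold pvIdx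
        rw [PySem.List.index?_append_singleton_self xs x hx, Option.getD_some]
      rw [hb, hkey _ haxs, hbx]
      exact le_of_lt (pvKey_lt_length xs a haxs)

lemma pvBKey_eq (xs : List String) (x : String) (hx : x ∈ xs) :
    pvBKey (pvFI xs) x = ((pvIdx xs x : Nat) : Int) := by
  obtain ⟨k, hk⟩ := Option.isSome_iff_exists.mp ((PySem.List.index?_isSome_iff xs x).mpr hx)
  unfold pvBKey pvIdx
  rw [pvFI_get?, hk]
  rfl

lemma pvSorted_eq (xs : List String) :
    PySem.List.sorted (pvFI xs).keys (pvBKey (pvFI xs)) false = PySem.Set.ofList xs := by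
  rw [pvFI_keys]
  refine PySem.List.sorted_eq_self_of_pairwise _ _ ?_
  refine (pvOfList_pairwise xs).imp_of_mem (fun {a b} ha hb h => ?_)
  rw [pvBKey_eq xs a ((PySem.Set.mem_ofList _ _).mp ha),
    pvBKey_eq xs b ((PySem.Set.mem_ofList _ _).mp hb)]
  exact_mod_cast h

-- B's dict-building loop over fresh distinct keys appends
lemma pvBFold (l : List String) (hnd : l.Nodup) :
    (PySem.List.enumerate l 1).foldl
        (fun st p => (st.1.insert p.2 p.1, st.2.insert p.1 p.2))
        ((⟨[]⟩ : PySem.Dict String Int), (⟨[]⟩ : PySem.Dict Int String))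
      = (⟨(PySem.List.enumerate l 1).map (fun p => (p.2, p.1))⟩, ⟨PySem.List.enumerate l 1⟩) := by
  change (PySem.List.enumerate l 1).foldl
      (fun st p => ((fun (d : PySem.Dict String Int) (p : Int × String) => d.insert p.2 p.1) st.1 p,
                    (fun (d : PySem.Dict Int String) (p : Int × String) => d.insert p.1 p.2) st.2 p))
      (⟨[]⟩, ⟨[]⟩) = _
  rw [PySem.List.foldl_prod_mk (fun (d : PySem.Dict String Int) (p : Int × String) => d.insert p.2 p.1)
    (fun (d : PySem.Dict Int String) (p : Int × String) => d.insert p.1 p.2)]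
  have hnd1 : ((PySem.List.enumerate l 1).map (fun p => p.2)).Nodup := by
    rw [PySem.List.map_snd_enumerate]; exact hnd
  have hnd2 : ((PySem.List.enumerate l 1).map (fun p => p.1)).Nodup :=
    (List.pairwise_map.mpr (PySem.List.pairwise_lt_enumerate l 1)).imp Int.ne_of_lt
  refine Prod.ext ?_ ?_
  · exact PySem.Dict.ext (by
      simpa using PySem.Dict.items_foldl_insert_fresh (d := (⟨[]⟩ : PySem.Dict String Int))
        (l := PySem.List.enumerate l 1) (k := fun p => p.2) (v := fun p => p.1)
        (fun a _ => rfl) hnd1)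
  · exact PySem.Dict.ext (by
      simpa using PySem.Dict.items_foldl_insert_fresh (d := (⟨[]⟩ : PySem.Dict Int String))
        (l := PySem.List.enumerate l 1) (k := fun p => p.1) (v := fun p => p.2)
        (fun a _ => rfl) hnd2)

-- ===== VERDICT (by name: the statement is the Claim_ definition above) =====
theorem BuildLabelledItems_spec : Claim_equal_BuildLabelledItems := by
  intro basketData _
  unfold Spec_BuildLabelledItems BuildLabelledItems BuildLabelledItems_alt
  have h0 : ((⟨[]⟩, ⟨[]⟩, 0) : PySem.Dict String Int × PySem.Dict Int String × Int) = pvMk [] := rfl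
  simp only [pvSorted_eq]
  rw [h0, ← List.foldl_flatMap, pvFold_mk, pvBFold _ (PySem.Set.nodup_ofList _)]
  rfl
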